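-- pv_equiv track=rewrite | github.com/olimpiadi-informatica/scolastiche | src/fibonacci-secondarie/2024-terza-fase/contest/s-3-abbassa-tutto/testcases.py | solve
-- ===== SOURCE A (Python) =====
-- import copy
--
-- def solve(n, p, c):
--     p = [x[0] for x in p]
--     p.reverse()
--     c = copy.deepcopy(c)
--     c.reverse()
--
--     s = [0] * n
--     s[0] = p[0]
--     for i in range(1, n):
--         s[i] = s[i-1] + p[i]
--
--     st = [(c[0], 0)]
--     for i in range(1, n):
--         while st and st[-1][0] >= c[i]:
--             st.pop()
--         st.append((c[i], i))
--
--     ris = st[0][0] * s[st[0][1]]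
--     for i in range(1, len(st)):
--         ris += st[i][0] * (s[st[i][1]] - s[st[i-1][1]])
--
--     return ris
-- ===== SOURCE B (Python) =====
-- def solve(n, p, c):
--     total = 0
--     m = c[-n]
--     for pj, cj in zip(p[-n:], c[-n:]):
--         m = min(m, cj)
--         total += m * pj[0]
--     return total
-- ===== Notes on version B (the rewrite author's own statement) =====
-- stated objective: simpler
-- what changed: Replaces A's list reversal + prefix-sum array + monotonic-stack aggregation by a single forward pass over the last n items that keeps a running minimum of c and accumulates min*p[j][0].
import Mathlib
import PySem

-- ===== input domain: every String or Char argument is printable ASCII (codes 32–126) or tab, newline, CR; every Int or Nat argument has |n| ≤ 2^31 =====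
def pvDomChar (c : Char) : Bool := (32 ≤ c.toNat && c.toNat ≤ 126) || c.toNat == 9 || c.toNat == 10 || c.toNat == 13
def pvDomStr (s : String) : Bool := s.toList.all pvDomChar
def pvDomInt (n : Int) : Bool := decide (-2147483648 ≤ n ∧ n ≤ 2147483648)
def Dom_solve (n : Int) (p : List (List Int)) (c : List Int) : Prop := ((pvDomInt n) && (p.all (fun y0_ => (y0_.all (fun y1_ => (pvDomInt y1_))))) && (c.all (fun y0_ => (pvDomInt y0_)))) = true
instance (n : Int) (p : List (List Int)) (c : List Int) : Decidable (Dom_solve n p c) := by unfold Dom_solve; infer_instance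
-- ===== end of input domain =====

-- B replaces A's reversal + prefix-sum array + monotonic stack by one forward running-minimum pass (simpler); same return value wherever A returns.

-- ===== PORT A =====
-- s-building loop "for i in range(1, n): s[i] = s[i-1] + p[i]" as recursion on the iteration count
def pvBuildS (ps : List Int) : Nat → List Int
  | 0 => [ps.getD 0 0]
  | i + 1 =>
      let s := pvBuildS ps i
      s ++ [s.getD i 0 + ps.getD (i + 1) 0]

-- "while st and st[-1][0] >= c[i]: st.pop()"; the stack is kept top-at-head (Python appends at the end)
def pvPop (cv : Int) : List (Int × Nat) → List (Int × Nat)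
  | [] => []
  | (v, j) :: rest => if cv ≤ v then pvPop cv rest else (v, j) :: rest

-- stack loop "for i in range(1, n): …" as recursion on the iteration count
def pvBuildSt (cs : List Int) : Nat → List (Int × Nat)
  | 0 => [(cs.getD 0 0, 0)]
  | i + 1 => (cs.getD (i + 1) 0, i + 1) :: pvPop (cs.getD (i + 1) 0) (pvBuildSt cs i)

-- final loop "for i in range(1, len(st)): ris += st[i][0]*(s[st[i][1]] - s[st[i-1][1]])"; stB is the stack bottom-first (Python order)
def pvRis (s : List Int) (stB : List (Int × Nat)) : Nat → Int
  | 0 => (stB.getD 0 (0, 0)).1 * s.getD (stB.getD 0 (0, 0)).2 0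
  | i + 1 => pvRis s stB i +
      (stB.getD (i + 1) (0, 0)).1 *
        (s.getD (stB.getD (i + 1) (0, 0)).2 0 - s.getD (stB.getD i (0, 0)).2 0)

def solve (n : Int) (p : List (List Int)) (c : List Int) : Int :=
  let ps := (p.map (fun x => (PySem.List.pyGet? x 0).getD 0)).reverse
  let cs := c.reverse
  let N := n.toNat
  let s := pvBuildS ps (N - 1)
  let st := pvBuildSt cs (N - 1)
  pvRis s st.reverse (st.length - 1)

-- ===== PORT B =====
def solve_alt (n : Int) (p : List (List Int)) (c : List Int) : Int :=
  let pp := PySem.List.slice p (some (-n)) none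
  let cc := PySem.List.slice c (some (-n)) none
  let m0 := (PySem.List.pyGet? c (-n)).getD 0
  ((pp.zip cc).foldl
    (fun (acc : Int × Int) x =>
      let m := min acc.2 x.2
      (acc.1 + m * ((PySem.List.pyGet? x.1 0).getD 0), m))
    (0, m0)).1

-- ===== PRECONDITION & SPEC =====
-- A raises IndexError when n < 1 (s[0] on an empty list), when n exceeds len(p) or len(c)
-- (p[0]/c[i] after reversal), or when some row of p is empty (x[0] in the comprehension).
def Pre_solve (n : Int) (p : List (List Int)) (c : List Int) : Prop :=
  1 ≤ n ∧ n ≤ (p.length : Int) ∧ n ≤ (c.length : Int) ∧ ∀ row ∈ p, row ≠ []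
instance (n : Int) (p : List (List Int)) (c : List Int) : Decidable (Pre_solve n p c) := by
  unfold Pre_solve; infer_instance

def pvWitness_solve : Int × List (List Int) × List Int := (2, [[3], [4]], [5, 1])

def Spec_solve (n : Int) (p : List (List Int)) (c : List Int) (out : Int) : Prop := out = solve_alt n p c
instance (n : Int) (p : List (List Int)) (c : List Int) (out : Int) : Decidable (Spec_solve n p c out) := by unfold Spec_solve; infer_instance

-- ===== CLAIM (what is proved, stated in full; the proofs are below) =====
def Claim_equal_solve : Prop := ∀ (n : Int) (p : List (List Int)) (c : List Int), Dom_solve n p c → Pre_solve n p c → Spec_solve n p c (solve n p c)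

-- ===== LEMMAS AND PROOFS =====

-- min of the segment u[k .. k+d]
def pvMseg (u : List Int) (k : Nat) : Nat → Int
  | 0 => u.getD k 0
  | d + 1 => min (pvMseg u k d) (u.getD (k + d + 1) 0)

-- value of the stack's step function at position k: the value of the entry with least index ≥ k
def pvStep : List (Int × Nat) → Nat → Int
  | [], _ => 0
  | [(v, _)], _ => v
  | (v, _) :: (v', j') :: rest, k => if j' < k then v else pvStep ((v', j') :: rest) k

-- strictly decreasing indices and values from the top (head) down
def pvR (a b : Int × Nat) : Prop := b.2 < a.2 ∧ b.1 < a.1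

def pvInv (u : List Int) (i : Nat) (st : List (Int × Nat)) : Prop :=
  (∃ v rest, st = (v, i) :: rest) ∧
  List.IsChain pvR st ∧
  (∀ k, k ≤ i → pvStep st k = pvMseg u k (i - k))

lemma pvMseg_cons_left (u : List Int) (k d : Nat) :
    pvMseg u k (d + 1) = min (u.getD k 0) (pvMseg u (k + 1) d) := by
  induction d generalizing k with
  | zero => simp [pvMseg]
  | succ d ih =>
      have harith : k + (d + 1) + 1 = (k + 1) + d + 1 := by omega
      rw [show pvMseg u k (d + 1 + 1) = min (pvMseg u k (d + 1)) (u.getD (k + (d + 1) + 1) 0) from rfl,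
          ih, min_assoc, harith]
      rfl

lemma pvMseg_shift (x : Int) (w : List Int) (k d : Nat) :
    pvMseg (x :: w) (k + 1) d = pvMseg w k d := by
  induction d with
  | zero => simp [pvMseg]
  | succ d ih =>
      have harith : k + 1 + d + 1 = (k + d + 1) + 1 := by omega
      rw [show pvMseg (x :: w) (k + 1) (d + 1) = min (pvMseg (x :: w) (k + 1) d) ((x :: w).getD (k + 1 + d + 1) 0) from rfl,
          ih, harith, List.getD_cons_succ]
      rfl

lemma pvMseg_le_first (w : List Int) (j : Nat) : pvMseg w 0 j ≤ w.getD 0 0 := by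
  induction j with
  | zero => exact le_rfl
  | succ j ih => exact le_trans (min_le_left _ _) ih

lemma pvMseg_congr (u u' : List Int) (k d : Nat)
    (h : ∀ t, k ≤ t → t ≤ k + d → u.getD t 0 = u'.getD t 0) :
    pvMseg u k d = pvMseg u' k d := by
  induction d with
  | zero => exact h k le_rfl (by omega)
  | succ d ih =>
      rw [show pvMseg u k (d + 1) = min (pvMseg u k d) (u.getD (k + d + 1) 0) from rfl,
          show pvMseg u' k (d + 1) = min (pvMseg u' k d) (u'.getD (k + d + 1) 0) from rfl,
          ih (fun t h1 h2 => h t h1 (by omega)), h (k + d + 1) (by omega) le_rfl]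

lemma pvMseg_reverse (w : List Int) (j : Nat) (hj : j < w.length) :
    pvMseg w.reverse (w.length - 1 - j) j = pvMseg w 0 j := by
  induction j with
  | zero =>
      show w.reverse.getD (w.length - 1 - 0) 0 = w.getD 0 0
      rw [List.getD_eq_getElem _ _ (by simp; omega), List.getD_eq_getElem _ _ (by omega)]
      rw [List.getElem_reverse]
      congr 1
      omega
  | succ j ih =>
      rw [pvMseg_cons_left]
      have h1 : w.length - 1 - (j + 1) + 1 = w.length - 1 - j := by omega
      rw [h1, ih (by omega)]
      have h2 : w.reverse.getD (w.length - 1 - (j + 1)) 0 = w.getD (j + 1) 0 := by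
        rw [List.getD_eq_getElem _ _ (by simp; omega), List.getD_eq_getElem _ _ (by omega)]
        rw [List.getElem_reverse]
        congr 1
        omega
      rw [h2, show pvMseg w 0 (j + 1) = min (pvMseg w 0 j) (w.getD (0 + j + 1) 0) from rfl]
      rw [min_comm]
      norm_num

-- every entry of a pvR-chain lies (weakly) below the head in both components
lemma pvChain_below (v : Int) (j : Nat) (rest : List (Int × Nat))
    (hch : List.IsChain pvR ((v, j) :: rest)) :
    ∀ e ∈ (v, j) :: rest, e.2 ≤ j ∧ e.1 ≤ v := by
  induction rest generalizing v j with
  | nil => intro e he; simp at he; simp [he]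
  | cons b rest ih =>
      intro e he
      obtain ⟨hR, hch'⟩ := List.isChain_cons_cons.mp hch
      rcases List.mem_cons.mp he with he | he
      · simp [he]
      · obtain ⟨vb, jb⟩ := b
        have := ih vb jb hch' e he
        obtain ⟨h1, h2⟩ := hR
        constructor <;> omega

lemma pvStep_le_head (v : Int) (j : Nat) (rest : List (Int × Nat)) (k : Nat)
    (hch : List.IsChain pvR ((v, j) :: rest)) :
    pvStep ((v, j) :: rest) k ≤ v := by
  induction rest generalizing v j with
  | nil => simp [pvStep]
  | cons b rest ih =>
      obtain ⟨vb, jb⟩ := b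
      obtain ⟨hR, hch'⟩ := List.isChain_cons_cons.mp hch
      by_cases h : jb < k
      · simp [pvStep, h]
      · simp only [pvStep, if_neg h]
        exact le_trans (ih vb jb hch') (le_of_lt hR.2)

lemma pvStep_mem (v : Int) (j : Nat) (rest : List (Int × Nat)) (k : Nat) (hk : k ≤ j) :
    ∃ e ∈ (v, j) :: rest, pvStep ((v, j) :: rest) k = e.1 ∧ k ≤ e.2 := by
  induction rest generalizing v j with
  | nil => exact ⟨(v, j), by simp, by simp [pvStep], hk⟩
  | cons b rest ih =>
      obtain ⟨vb, jb⟩ := b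
      by_cases h : jb < k
      · exact ⟨(v, j), by simp, by simp [pvStep, h], hk⟩
      · obtain ⟨e, he, hval, hke⟩ := ih vb jb (by omega)
        refine ⟨e, by simpa using Or.inr he, ?_, hke⟩
        simpa [pvStep, if_neg h] using hval

lemma pvStep_suffix (st : List (Int × Nat)) (v' : Int) (j' : Nat) (rest' : List (Int × Nat))
    (hsuf : (v', j') :: rest' <:+ st) (hch : List.IsChain pvR st) (k : Nat) (hk : k ≤ j') :
    pvStep st k = pvStep ((v', j') :: rest') k := by
  induction st with
  | nil => exact absurd (List.eq_nil_of_suffix_nil hsuf) (by simp)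
  | cons a t iht =>
      rcases List.suffix_cons_iff.mp hsuf with heq | hsuf'
      · rw [heq]
      · have htne : t ≠ [] := by
          intro h; rw [h] at hsuf'; exact absurd (List.eq_nil_of_suffix_nil hsuf') (by simp)
        obtain ⟨b, t', rfl⟩ := List.exists_cons_of_ne_nil htne
        obtain ⟨vb, jb⟩ := b
        have hch' : List.IsChain pvR ((vb, jb) :: t') := (List.isChain_cons_cons.mp hch).2
        have hmem : (v', j') ∈ (vb, jb) :: t' := hsuf'.subset (by simp)
        have hle : j' ≤ jb := (pvChain_below vb jb t' hch' (v', j') hmem).1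
        obtain ⟨va, ja⟩ := a
        rw [show pvStep ((va, ja) :: (vb, jb) :: t') k
              = if jb < k then va else pvStep ((vb, jb) :: t') k from rfl, if_neg (by omega)]
        exact iht hsuf' hch'

lemma pvPop_suffix (cv : Int) (st : List (Int × Nat)) : pvPop cv st <:+ st := by
  induction st with
  | nil => simp [pvPop]
  | cons a rest ih =>
      obtain ⟨v, j⟩ := a
      by_cases h : cv ≤ v
      · simpa [pvPop, h] using ih.trans (List.suffix_cons _ _)
      · simp [pvPop, h]

lemma pvPop_popped (cv : Int) (st : List (Int × Nat)) :
    ∀ e ∈ st, e ∉ pvPop cv st → cv ≤ e.1 := by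
  induction st with
  | nil => simp
  | cons a rest ih =>
      obtain ⟨v, j⟩ := a
      intro e he hne
      by_cases h : cv ≤ v
      · rw [show pvPop cv ((v, j) :: rest) = pvPop cv rest from by simp [pvPop, h]] at hne
        rcases List.mem_cons.mp he with he | he
        · rw [he]; exact h
        · exact ih e he hne
      · exact absurd he (by simpa [pvPop, h] using hne)

lemma pvPop_head_lt (cv : Int) (st : List (Int × Nat)) (v' : Int) (j' : Nat)
    (rest' : List (Int × Nat)) (h : pvPop cv st = (v', j') :: rest') : v' < cv := by
  induction st with
  | nil => simp [pvPop] at h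
  | cons a rest ih =>
      obtain ⟨v, j⟩ := a
      by_cases hc : cv ≤ v
      · exact ih (by simpa [pvPop, hc] using h)
      · simp [pvPop, hc] at h
        omega

-- new step function after pop-and-push = pointwise min with the new value, on old positions
lemma pvStep_push (cv v : Int) (i : Nat) (tail : List (Int × Nat))
    (hch : List.IsChain pvR ((v, i) :: tail)) (k : Nat) (hk : k ≤ i) :
    pvStep ((cv, i + 1) :: pvPop cv ((v, i) :: tail)) k
      = min (pvStep ((v, i) :: tail) k) cv := by
  cases hpop : pvPop cv ((v, i) :: tail) with
  | nil =>
      obtain ⟨e, hmem, hval, hke⟩ := pvStep_mem v i tail k hk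
      have hce : cv ≤ e.1 := pvPop_popped cv _ e hmem (by simp [hpop])
      rw [show pvStep [(cv, i + 1)] k = cv from rfl, hval]
      exact (min_eq_right (by omega)).symm
  | cons hd' rest' =>
      obtain ⟨v', j'⟩ := hd'
      have hv'c : v' < cv := pvPop_head_lt cv _ v' j' rest' hpop
      have hsuf : (v', j') :: rest' <:+ (v, i) :: tail := hpop ▸ pvPop_suffix cv _
      have hmem' : (v', j') ∈ (v, i) :: tail := hsuf.subset (by simp)
      have hj'i : j' ≤ i := (pvChain_below v i tail hch (v', j') hmem').1
      by_cases hkj : j' < k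
      · rw [show pvStep ((cv, i + 1) :: (v', j') :: rest') k
              = if j' < k then cv else pvStep ((v', j') :: rest') k from rfl, if_pos hkj]
        obtain ⟨e, hmem, hval, hke⟩ := pvStep_mem v i tail k hk
        have henot : e ∉ pvPop cv ((v, i) :: tail) := by
          rw [hpop]
          intro hin
          have := (pvChain_below v' j' rest' (hch.suffix hsuf) e hin).1
          omega
        have hce : cv ≤ e.1 := pvPop_popped cv _ e hmem henot
        rw [hval]
        exact (min_eq_right (by omega)).symm
      · rw [show pvStep ((cv, i + 1) :: (v', j') :: rest') k
              = if j' < k then cv else pvStep ((v', j') :: rest') k from rfl, if_neg hkj]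
        have h2 := pvStep_suffix ((v, i) :: tail) v' j' rest' hsuf hch k (by omega)
        have h3 : pvStep ((v', j') :: rest') k ≤ v' := pvStep_le_head v' j' rest' k (hch.suffix hsuf)
        rw [h2]
        exact (min_eq_left (by omega)).symm

lemma pvStep_push_top (cv v : Int) (i : Nat) (tail : List (Int × Nat))
    (hch : List.IsChain pvR ((v, i) :: tail)) :
    pvStep ((cv, i + 1) :: pvPop cv ((v, i) :: tail)) (i + 1) = cv := by
  cases hpop : pvPop cv ((v, i) :: tail) with
  | nil => rfl
  | cons hd' rest' =>
      obtain ⟨v', j'⟩ := hd'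
      have hsuf : (v', j') :: rest' <:+ (v, i) :: tail := hpop ▸ pvPop_suffix cv _
      have hj'i : j' ≤ i := (pvChain_below v i tail hch (v', j') (hsuf.subset (by simp))).1
      rw [show pvStep ((cv, i + 1) :: (v', j') :: rest') (i + 1)
            = if j' < i + 1 then cv else pvStep ((v', j') :: rest') (i + 1) from rfl,
          if_pos (by omega)]

lemma pvChain_push (cv v : Int) (i : Nat) (tail : List (Int × Nat))
    (hch : List.IsChain pvR ((v, i) :: tail)) :
    List.IsChain pvR ((cv, i + 1) :: pvPop cv ((v, i) :: tail)) := by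
  cases hpop : pvPop cv ((v, i) :: tail) with
  | nil => exact List.IsChain.singleton _
  | cons hd' rest' =>
      obtain ⟨v', j'⟩ := hd'
      have hv'c : v' < cv := pvPop_head_lt cv _ v' j' rest' hpop
      have hsuf : (v', j') :: rest' <:+ (v, i) :: tail := hpop ▸ pvPop_suffix cv _
      have hj'i : j' ≤ i := (pvChain_below v i tail hch (v', j') (hsuf.subset (by simp))).1
      exact List.isChain_cons_cons.mpr ⟨⟨by omega, hv'c⟩, hch.suffix hsuf⟩

lemma pvInv_buildSt (u : List Int) (i : Nat) : pvInv u i (pvBuildSt u i) := by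
  induction i with
  | zero =>
      refine ⟨⟨u.getD 0 0, [], rfl⟩, List.IsChain.singleton _, ?_⟩
      intro k hk
      interval_cases k
      rfl
  | succ i ih =>
      obtain ⟨⟨v, rest, hst⟩, hch, hstep⟩ := ih
      rw [hst] at hch hstep
      refine ⟨⟨u.getD (i + 1) 0, _, rfl⟩, ?_, ?_⟩
      · rw [show pvBuildSt u (i + 1)
              = (u.getD (i + 1) 0, i + 1) :: pvPop (u.getD (i + 1) 0) (pvBuildSt u i) from rfl, hst]
        exact pvChain_push _ v i rest hch
      · intro k hk
        rw [show pvBuildSt u (i + 1)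
              = (u.getD (i + 1) 0, i + 1) :: pvPop (u.getD (i + 1) 0) (pvBuildSt u i) from rfl, hst]
        rcases Nat.lt_or_ge k (i + 1) with hki | hki
        · rw [pvStep_push _ v i rest hch k (by omega), hstep k (by omega)]
          have h1 : i + 1 - k = (i - k) + 1 := by omega
          rw [h1, show pvMseg u k ((i - k) + 1) = min (pvMseg u k (i - k)) (u.getD (k + (i - k) + 1) 0) from rfl,
              show k + (i - k) + 1 = i + 1 from by omega]
        · have hk1 : k = i + 1 := by omega
          subst hk1
          rw [pvStep_push_top _ v i rest hch]
          simp [pvMseg]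

lemma pvRis_append (s : List Int) (stB : List (Int × Nat)) (x : Int × Nat) (a : Nat)
    (ha : a < stB.length) : pvRis s (stB ++ [x]) a = pvRis s stB a := by
  induction a with
  | zero =>
      rw [show pvRis s (stB ++ [x]) 0 = ((stB ++ [x]).getD 0 (0, 0)).1 * s.getD ((stB ++ [x]).getD 0 (0, 0)).2 0 from rfl,
          show pvRis s stB 0 = (stB.getD 0 (0, 0)).1 * s.getD (stB.getD 0 (0, 0)).2 0 from rfl,
          List.getD_append _ _ _ _ ha]
  | succ a iha =>
      rw [show pvRis s (stB ++ [x]) (a + 1) = pvRis s (stB ++ [x]) a + ((stB ++ [x]).getD (a + 1) (0, 0)).1 * (s.getD ((stB ++ [x]).getD (a + 1) (0, 0)).2 0 - s.getD ((stB ++ [x]).getD a (0, 0)).2 0) from rfl,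
          show pvRis s stB (a + 1) = pvRis s stB a + (stB.getD (a + 1) (0, 0)).1 * (s.getD (stB.getD (a + 1) (0, 0)).2 0 - s.getD (stB.getD a (0, 0)).2 0) from rfl,
          iha (by omega), List.getD_append _ _ _ _ ha, List.getD_append _ _ _ _ (by omega)]

lemma pvRis_spec (s q : List Int) (v : Int) (i : Nat) (rest : List (Int × Nat))
    (hch : List.IsChain pvR ((v, i) :: rest))
    (hs : ∀ j ≤ i, s.getD j 0 = ∑ t ∈ Finset.range (j + 1), q.getD t 0) :
    pvRis s ((v, i) :: rest).reverse (((v, i) :: rest).length - 1) =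
      ∑ k ∈ Finset.range (i + 1), pvStep ((v, i) :: rest) k * q.getD k 0 := by
  induction rest generalizing v i with
  | nil =>
      show pvRis s ((v, i) :: ([] : List (Int × Nat))).reverse 0 = _
      rw [show ((v, i) :: ([] : List (Int × Nat))).reverse = [(v, i)] from rfl]
      rw [show pvRis s [(v, i)] 0 = v * s.getD i 0 from rfl, hs i le_rfl, Finset.mul_sum]
      exact Finset.sum_congr rfl (fun k _ => by rw [show pvStep [(v, i)] k = v from rfl])
  | cons b rest' ih =>
      obtain ⟨v', j'⟩ := b
      obtain ⟨hR, hch'⟩ := List.isChain_cons_cons.mp hch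
      have hj'i : j' < i := hR.1
      have hrev : ((v, i) :: (v', j') :: rest').reverse
          = ((v', j') :: rest').reverse ++ [(v, i)] := by simp
      have hlen : ((v, i) :: (v', j') :: rest').length - 1 = rest'.length + 1 := by simp
      rw [hrev, hlen]
      have hlenrev : ((v', j') :: rest').reverse.length = rest'.length + 1 := by simp
      have g1 : (((v', j') :: rest').reverse ++ [(v, i)]).getD (rest'.length + 1) (0, 0) = (v, i) := by
        rw [List.getD_eq_getElem _ _ (by simp), List.getElem_append_right (by omega)]
        simp
      have g2 : (((v', j') :: rest').reverse ++ [(v, i)]).getD rest'.length (0, 0) = (v', j') := by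
        rw [List.getD_append _ _ _ _ (by simp)]
        rw [show ((v', j') :: rest').reverse = rest'.reverse ++ [(v', j')] from by simp]
        rw [List.getD_eq_getElem _ _ (by simp), List.getElem_append_right (by simp)]
        simp
      rw [show pvRis s (((v', j') :: rest').reverse ++ [(v, i)]) (rest'.length + 1)
            = pvRis s (((v', j') :: rest').reverse ++ [(v, i)]) rest'.length
              + ((((v', j') :: rest').reverse ++ [(v, i)]).getD (rest'.length + 1) (0, 0)).1
                * (s.getD ((((v', j') :: rest').reverse ++ [(v, i)]).getD (rest'.length + 1) (0, 0)).2 0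
                   - s.getD ((((v', j') :: rest').reverse ++ [(v, i)]).getD rest'.length (0, 0)).2 0) from rfl,
          g1, g2, pvRis_append s _ _ _ (by simp)]
      have hihlen : ((v', j') :: rest').length - 1 = rest'.length := by simp
      have hIH := ih v' j' hch' (fun j hj => hs j (by omega))
      rw [hihlen] at hIH
      rw [hIH, hs i le_rfl, hs j' (by omega)]
      -- split the RHS sum at j' + 1
      have hsplit : ∑ k ∈ Finset.range (i + 1), pvStep ((v, i) :: (v', j') :: rest') k * q.getD k 0
          = (∑ k ∈ Finset.Ico 0 (j' + 1), pvStep ((v, i) :: (v', j') :: rest') k * q.getD k 0)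
            + ∑ k ∈ Finset.Ico (j' + 1) (i + 1), pvStep ((v, i) :: (v', j') :: rest') k * q.getD k 0 := by
        rw [Finset.sum_Ico_consecutive _ (by omega) (by omega), ← Finset.range_eq_Ico]
      rw [hsplit]
      have hlow : ∑ k ∈ Finset.Ico 0 (j' + 1), pvStep ((v, i) :: (v', j') :: rest') k * q.getD k 0
          = ∑ k ∈ Finset.range (j' + 1), pvStep ((v', j') :: rest') k * q.getD k 0 := by
        rw [← Finset.range_eq_Ico]
        refine Finset.sum_congr rfl (fun k hk => ?_)
        have hkj : ¬ (j' < k) := by simp at hk; omega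
        rw [show pvStep ((v, i) :: (v', j') :: rest') k
              = if j' < k then v else pvStep ((v', j') :: rest') k from rfl, if_neg hkj]
      have hhigh : ∑ k ∈ Finset.Ico (j' + 1) (i + 1), pvStep ((v, i) :: (v', j') :: rest') k * q.getD k 0
          = v * ((∑ t ∈ Finset.range (i + 1), q.getD t 0) - ∑ t ∈ Finset.range (j' + 1), q.getD t 0) := by
        rw [← Finset.sum_Ico_eq_sub _ (by omega), Finset.mul_sum]
        refine Finset.sum_congr rfl (fun k hk => ?_)
        have hkj : j' < k := by simp at hk; omega
        rw [show pvStep ((v, i) :: (v', j') :: rest') k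
              = if j' < k then v else pvStep ((v', j') :: rest') k from rfl, if_pos hkj]
      rw [hlow, hhigh]

lemma pvBuildS_length (ps : List Int) (i : Nat) : (pvBuildS ps i).length = i + 1 := by
  induction i with
  | zero => rfl
  | succ i ih => simp [pvBuildS, ih]

lemma pvBuildS_spec (ps : List Int) (i j : Nat) (hj : j ≤ i) :
    (pvBuildS ps i).getD j 0 = ∑ t ∈ Finset.range (j + 1), ps.getD t 0 := by
  induction i generalizing j with
  | zero =>
      interval_cases j
      simp [pvBuildS]
  | succ i ih =>
      rcases Nat.lt_or_ge j (i + 1) with hji | hji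
      · rw [show pvBuildS ps (i + 1) = pvBuildS ps i ++ [(pvBuildS ps i).getD i 0 + ps.getD (i + 1) 0] from rfl,
            List.getD_append _ _ _ _ (by rw [pvBuildS_length]; omega)]
        exact ih j (by omega)
      · have hj1 : j = i + 1 := by omega
        subst hj1
        rw [show pvBuildS ps (i + 1) = pvBuildS ps i ++ [(pvBuildS ps i).getD i 0 + ps.getD (i + 1) 0] from rfl,
            List.getD_eq_getElem _ _ (by simp [pvBuildS_length]),
            List.getElem_append_right (by rw [pvBuildS_length])]
        simp only [pvBuildS_length, Nat.sub_self, List.getElem_cons_zero]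
        rw [ih i le_rfl, Finset.sum_range_succ, Finset.sum_range_succ, Finset.sum_range_succ]

lemma pvBfold (pp : List (List Int)) (cc : List Int) (acc m : Int) (h : pp.length = cc.length) :
    ((pp.zip cc).foldl
      (fun (a : Int × Int) x =>
        let mm := min a.2 x.2
        (a.1 + mm * ((PySem.List.pyGet? x.1 0).getD 0), mm))
      (acc, m)).1 =
    acc + ∑ j ∈ Finset.range cc.length,
      (min m (pvMseg cc 0 j)) * ((PySem.List.pyGet? (pp.getD j []) 0).getD 0) := by
  induction pp generalizing cc acc m with
  | nil =>
      have : cc = [] := by cases cc <;> simp_all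
      subst this
      simp
  | cons p0 ppt ih =>
      cases cc with
      | nil => simp at h
      | cons c0 cct =>
          have hlen : ppt.length = cct.length := by simpa using h
          rw [show ((p0 :: ppt).zip (c0 :: cct)) = (p0, c0) :: ppt.zip cct from rfl]
          rw [List.foldl_cons]
          have hstep1 : (let mm := min (acc, m).2 (p0, c0).2;
              ((acc, m).1 + mm * ((PySem.List.pyGet? (p0, c0).1 0).getD 0 : Int), mm))
              = (acc + min m c0 * ((PySem.List.pyGet? p0 0).getD 0), min m c0) := rfl
          rw [hstep1, ih cct _ _ hlen]
          rw [show (c0 :: cct).length = cct.length + 1 from rfl, Finset.sum_range_succ']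
          have hterm : ∀ j, min (min m c0) (pvMseg cct 0 j) * ((PySem.List.pyGet? (ppt.getD j []) 0).getD 0)
              = min m (pvMseg (c0 :: cct) 0 (j + 1)) * ((PySem.List.pyGet? ((p0 :: ppt).getD (j + 1) []) 0).getD 0) := by
            intro j
            rw [pvMseg_cons_left, show pvMseg (c0 :: cct) (0 + 1) j = pvMseg cct 0 j from pvMseg_shift c0 cct 0 j]
            rw [List.getD_cons_succ, show (c0 :: cct).getD 0 0 = c0 from rfl, min_assoc]
          rw [Finset.sum_congr rfl (fun j _ => hterm j)]
          rw [show min m (pvMseg (c0 :: cct) 0 0) * ((PySem.List.pyGet? ((p0 :: ppt).getD 0 []) 0).getD 0)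
                = min m c0 * ((PySem.List.pyGet? p0 0).getD 0) from rfl]
          ring

lemma pvNegGet (c : List Int) (N : Nat) (h1 : 1 ≤ N) (h2 : N ≤ c.length) :
    (PySem.List.pyGet? c (-(N : Int))).getD 0 = c.getD (c.length - N) 0 := by
  simp [PySem.List.pyGet?, PySem.List.pyIdx?]
  rw [if_neg (by omega), if_pos h2]
  simp

lemma pvNegSlice {α : Type} (c : List α) (N : Nat) (h1 : 1 ≤ N) :
    PySem.List.slice c (some (-(N : Int))) none = c.drop (c.length - N) := by
  rw [PySem.List.slice_some_none, PySem.List.clampIdx_neg_natCast _ _ (by omega)]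

-- ===== VERDICT (by name: the statement is the Claim_ definition above) =====
theorem solve_spec : Claim_equal_solve := by
  intro n p c hDom hPre
  obtain ⟨hn1, hnp, hnc, hrows⟩ := hPre
  unfold Spec_solve
  set N := n.toNat with hN
  have hNn : (N : Int) = n := Int.toNat_of_nonneg (by omega)
  have hN1 : 1 ≤ N := by omega
  have hNp : N ≤ p.length := by omega
  have hNc : N ≤ c.length := by omega
  -- abbreviations
  set hd : List Int → Int := fun x => (PySem.List.pyGet? x 0).getD 0 with hhd
  set ps : List Int := (p.map hd).reverse with hps
  set cs : List Int := c.reverse with hcs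
  set pp : List (List Int) := p.drop (p.length - N) with hpp
  set cc : List Int := c.drop (c.length - N) with hcc
  have hppl : pp.length = N := by rw [hpp, List.length_drop]; omega
  have hccl : cc.length = N := by rw [hcc, List.length_drop]; omega
  have hpsl : ps.length = p.length := by simp [hps]
  have hcsl : cs.length = c.length := by simp [hcs]
  -- A side
  have hA : solve n p c = ∑ k ∈ Finset.range (N - 1 + 1), pvMseg cs k ((N - 1) - k) * ps.getD k 0 := by
    obtain ⟨⟨v, rest, hst⟩, hch, hstep⟩ := pvInv_buildSt cs (N - 1)
    have hsspec : ∀ j ≤ N - 1, (pvBuildS ps (N - 1)).getD j 0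
        = ∑ t ∈ Finset.range (j + 1), ps.getD t 0 := fun j hj => pvBuildS_spec ps (N - 1) j hj
    rw [hst] at hch hstep
    show pvRis (pvBuildS ps (N - 1)) (pvBuildSt cs (N - 1)).reverse ((pvBuildSt cs (N - 1)).length - 1)
        = _
    rw [hst, pvRis_spec (pvBuildS ps (N - 1)) ps v (N - 1) rest hch hsspec]
    exact Finset.sum_congr rfl (fun k hk => by
      rw [hstep k (by simp at hk; omega)])
  -- B side
  have hB : solve_alt n p c = ∑ j ∈ Finset.range N, pvMseg cc 0 j * hd (pp.getD j []) := by
    show (((PySem.List.slice p (some (-n)) none).zip (PySem.List.slice c (some (-n)) none)).foldl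
          (fun (acc : Int × Int) (x : List Int × Int) =>
            let m := min acc.2 x.2
            (acc.1 + m * ((PySem.List.pyGet? x.1 0).getD 0), m))
          (0, (PySem.List.pyGet? c (-n)).getD 0)).1
        = ∑ j ∈ Finset.range N, pvMseg cc 0 j * hd (pp.getD j [])
    rw [← hNn, pvNegSlice p N hN1, pvNegSlice c N hN1, pvNegGet c N hN1 hNc]
    rw [pvBfold _ _ _ _ (by rw [← hpp, ← hcc, hppl, hccl])]
    rw [← hpp, ← hcc, hccl, zero_add]
    refine Finset.sum_congr rfl (fun j hj => ?_)
    have hm0 : c.getD (c.length - N) 0 = cc.getD 0 0 := by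
      rw [hcc, List.getD_eq_getElem _ _ (by omega), List.getD_eq_getElem _ _ (by rw [List.length_drop]; omega)]
      simp
    rw [hm0, min_eq_right (pvMseg_le_first cc j)]
  -- bridge
  rw [hA, hB, show N - 1 + 1 = N from by omega]
  rw [← Finset.sum_range_reflect (fun k => pvMseg cs k ((N - 1) - k) * ps.getD k 0) N]
  refine Finset.sum_congr rfl (fun j hj => ?_)
  have hjN : j < N := Finset.mem_range.mp hj
  have e1 : (N - 1) - (N - 1 - j) = j := by omega
  have e2 : pvMseg cs (N - 1 - j) j = pvMseg cc 0 j := by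
    have htake : cc.reverse = cs.take N := by
      rw [hcc, hcs, ← List.take_reverse]
    have hcongr : pvMseg cs (N - 1 - j) j = pvMseg cc.reverse (N - 1 - j) j := by
      refine pvMseg_congr _ _ _ _ (fun t ht1 ht2 => ?_)
      rw [htake]
      rw [List.getD_eq_getElem _ _ (by rw [hcsl]; omega),
          List.getD_eq_getElem _ _ (by rw [List.length_take]; simp [hcsl]; omega)]
      simp
    have hrev := pvMseg_reverse cc j (by rw [hccl]; omega)
    rw [hccl] at hrev
    rw [hcongr, hrev]
  have e3 : ps.getD (N - 1 - j) 0 = hd (pp.getD j []) := by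
    have h1 : pp.getD j [] = p.getD (p.length - N + j) [] := by
      rw [hpp, List.getD_eq_getElem _ _ (by rw [List.length_drop]; omega),
          List.getD_eq_getElem _ _ (by omega)]
      simp
    have h2 : ps.getD (N - 1 - j) 0 = hd (p.getD (p.length - N + j) []) := by
      rw [hps, List.getD_eq_getElem _ _ (by simp; omega),
          List.getD_eq_getElem _ _ (by omega)]
      rw [List.getElem_reverse, List.getElem_map]
      exact congrArg hd (getElem_congr rfl (by simp; omega) (by simp; omega))
    rw [h1]
    exact h2
  rw [e1, e2, e3]
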